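-- pv_equiv track=rewrite | github.com/danibarranqueroo/TechnicalExerciseProwler | analisis.py | analizar_chequeos
-- ===== SOURCE A (Python) =====
-- def analizar_chequeos(data):
--     total_checks = len(data)
--
--     passed_checks = sum(1 for check in data if check["status"] == "PASS")
--     failed_checks = sum(1 for check in data if check["status"] == "FAIL")
--
--     failed_checks_list = [
--         {"check": check["check"], "recommendation": check["recommendation"]}
--         for check in data if check["status"] == "FAIL"
--     ]
--
--     return total_checks, passed_checks, failed_checks, failed_checks_list
-- ===== SOURCE B (Python) =====
-- def analizar_chequeos(data):
--     # Group the checks by status into a dict index, then read the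
--     # answers off the "PASS" and "FAIL" buckets.
--     groups = {}
--     for check in data:
--         groups.setdefault(check["status"], []).append(check)
--     fails = groups.get("FAIL", [])
--     failed_checks_list = [
--         {"check": c["check"], "recommendation": c["recommendation"]} for c in fails
--     ]
--     return len(data), len(groups.get("PASS", [])), len(fails), failed_checks_list
-- ===== Notes on version B (the rewrite author's own statement) =====
-- stated objective: alternative
-- what changed: Instead of A's three filtering passes over data, B builds a dict index grouping the checks by status in one pass and then reads the counts and the failed list off the PASS and FAIL buckets.
import Mathlib
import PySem

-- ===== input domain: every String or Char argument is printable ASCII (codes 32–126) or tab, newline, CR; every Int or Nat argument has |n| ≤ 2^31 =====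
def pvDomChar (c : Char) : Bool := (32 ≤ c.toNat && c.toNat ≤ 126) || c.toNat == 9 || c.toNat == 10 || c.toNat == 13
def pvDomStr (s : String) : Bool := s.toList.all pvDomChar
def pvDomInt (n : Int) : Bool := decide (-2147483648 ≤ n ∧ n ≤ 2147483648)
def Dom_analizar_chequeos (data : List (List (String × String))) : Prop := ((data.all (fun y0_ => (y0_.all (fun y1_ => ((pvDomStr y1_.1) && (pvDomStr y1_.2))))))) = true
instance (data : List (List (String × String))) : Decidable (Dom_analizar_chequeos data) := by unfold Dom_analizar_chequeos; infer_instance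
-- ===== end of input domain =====

-- B replaces A's three filtering passes with a dict index grouping checks by status, then reads counts and the failed list off the PASS/FAIL buckets (alternative algorithm; same O(n) cost).


-- ===== PORT A =====
-- check["k"]: first-match lookup in the association list (Pre_ guarantees the key is present where A reads it)
def pvGetKey (check : List (String × String)) (k : String) : String :=
  (check.lookup k).getD ""

def pvMkFailEntry (check : List (String × String)) : List (String × String) :=
  [("check", pvGetKey check "check"), ("recommendation", pvGetKey check "recommendation")]

def analizar_chequeos (data : List (List (String × String))) : Int × Int × Int × (List (List (String × String))) :=
  let total_checks : Int := data.length
  let passed_checks : Int :=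
    data.foldl (fun acc check => if check.lookup "status" = some "PASS" then acc + 1 else acc) 0
  let failed_checks : Int :=
    data.foldl (fun acc check => if check.lookup "status" = some "FAIL" then acc + 1 else acc) 0
  let failed_checks_list :=
    (data.filter (fun check => check.lookup "status" = some "FAIL")).map pvMkFailEntry
  (total_checks, passed_checks, failed_checks, failed_checks_list)

-- ===== PORT B =====
-- groups.setdefault(check["status"], []).append(check) == modify at key with default [] appending the check
def pvGroup (data : List (List (String × String))) : PySem.Dict String (List (List (String × String))) :=
  data.foldl (fun d check => d.modify (pvGetKey check "status") [] (· ++ [check])) PySem.Dict.empty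

def analizar_chequeos_alt (data : List (List (String × String))) : Int × Int × Int × (List (List (String × String))) :=
  let groups := pvGroup data
  let fails := groups.getD "FAIL" []
  let failed_checks_list := fails.map pvMkFailEntry
  ((data.length : Int), ((groups.getD "PASS" []).length : Int), (fails.length : Int), failed_checks_list)

-- ===== PRECONDITION & SPEC =====
-- Pre_ excludes exactly the inputs on which the Python raises KeyError: a check without a
-- "status" key, or a FAIL check missing "check" or "recommendation".
def Pre_analizar_chequeos (data : List (List (String × String))) : Prop :=
  ∀ check ∈ data, (check.lookup "status").isSome ∧
    (check.lookup "status" = some "FAIL" →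
      (check.lookup "check").isSome ∧ (check.lookup "recommendation").isSome)
instance (data : List (List (String × String))) : Decidable (Pre_analizar_chequeos data) := by unfold Pre_analizar_chequeos; infer_instance
def pvWitness_analizar_chequeos : (List (List (String × String))) :=
  [[("status", "PASS")], [("status", "FAIL"), ("check", "c1"), ("recommendation", "r1")], [("status", "INFO")]]

def Spec_analizar_chequeos (data : List (List (String × String))) (out : Int × Int × Int × (List (List (String × String)))) : Prop := out = analizar_chequeos_alt data
instance (data : List (List (String × String))) (out : Int × Int × Int × (List (List (String × String)))) : Decidable (Spec_analizar_chequeos data out) := by unfold Spec_analizar_chequeos; infer_instance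

-- ===== CLAIM (what is proved, stated in full; the proofs are below) =====
def Claim_equal_analizar_chequeos : Prop := ∀ (data : List (List (String × String))), Dom_analizar_chequeos data → Pre_analizar_chequeos data → Spec_analizar_chequeos data (analizar_chequeos data)

-- ===== LEMMAS AND PROOFS =====
-- The grouping fold, read at any key k ≠ "" : exactly the checks whose "status" value is k, in order.
theorem pvGroup_getD (data : List (List (String × String))) (k : String)
    (d : PySem.Dict String (List (List (String × String)))) :
    (data.foldl (fun d check => d.modify (pvGetKey check "status") [] (· ++ [check])) d).getD k []
      = d.getD k [] ++ data.filter (fun check => pvGetKey check "status" = k) := by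
  induction data generalizing d with
  | nil => simp
  | cons c rest ih =>
    simp only [List.foldl_cons, List.filter_cons, ih, PySem.Dict.getD_modify]
    by_cases h : pvGetKey c "status" = k
    · simp [h]
    · simp [h, Ne.symm h]

-- Under a present "status" key, the grouping key equals k ≠ "" iff the lookup is `some k`.
theorem pvGetKey_eq_iff (c : List (String × String)) (k : String) (hk : k ≠ "") :
    (pvGetKey c "status" = k) ↔ c.lookup "status" = some k := by
  unfold pvGetKey
  cases h : c.lookup "status" with
  | none => simp [Ne.symm hk]
  | some s => simp

-- A's counting fold is the length of the corresponding filter.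
theorem count_fold_eq_filter_length (data : List (List (String × String)))
    (p : List (String × String) → Prop) [DecidablePred p] (acc : Int) :
    data.foldl (fun acc check => if p check then acc + 1 else acc) acc
      = acc + (data.filter (fun check => p check)).length := by
  induction data generalizing acc with
  | nil => simp
  | cons c rest ih =>
    simp only [List.foldl_cons, List.filter_cons]
    by_cases h : p c
    · simp [h, ih]; ring
    · simp [h, ih]

theorem pvGroup_bucket (data : List (List (String × String))) (k : String) (hk : k ≠ "") :
    (pvGroup data).getD k [] = data.filter (fun check => check.lookup "status" = some k) := by
  rw [pvGroup, pvGroup_getD]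
  simp only [PySem.Dict.getD_empty, List.nil_append]
  exact List.filter_congr (fun c _ => by simp [pvGetKey_eq_iff c k hk])

-- ===== VERDICT (by name: the statement is the Claim_ definition above) =====
theorem analizar_chequeos_spec : Claim_equal_analizar_chequeos := by
  intro data _ _
  show _ = analizar_chequeos_alt data
  simp only [analizar_chequeos, analizar_chequeos_alt,
    pvGroup_bucket data "PASS" (by decide), pvGroup_bucket data "FAIL" (by decide),
    count_fold_eq_filter_length]
  simp
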